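-- pv_equiv track=rewrite | github.com/sin0105/fun411-1- | week13/HW13_3.py | sum_d_product
-- ===== SOURCE A (Python) =====
-- def sum_d_product(m: list[list[int]]):
--     if len(m) == 2:
--         return (m[0][0]*m[1][1]) + (m[0][1]*m[1][0])
--
--     ans = []
--     for i in range(0,len(m),2):
--         skip1 = range(0,len(m[0]),2)
--         skip2 = range(1,len(m[0]),2)
--         solution = list(map(lambda x,y : (m[i][x] * m[i+1][y]) + (m[i][y] * m[i+1][x]),skip1, skip2))
--         ans.extend([solution])
--
--     result = sum_d_product(ans)
--     return result
-- ===== SOURCE B (Python) =====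
-- def _pairs(r, s):
--     # combine two rows into one row, two columns at a time
--     if len(r) < 2 or len(s) < 2:
--         return []
--     return [r[0]*s[1] + r[1]*s[0]] + _pairs(r[2:], s[2:])
--
--
-- def _halve(m):
--     # combine rows two at a time
--     if len(m) < 2:
--         return []
--     return [_pairs(m[0], m[1])] + _halve(m[2:])
--
--
-- def sum_d_product(m: list[list[int]]):
--     while len(m) != 2:
--         m = _halve(m)
--     return (m[0][0]*m[1][1]) + (m[0][1]*m[1][0])
-- ===== Notes on version B (the rewrite author's own statement) =====
-- stated objective: alternative
-- what changed: A's top-level recursion with index-based inner loops (range/map over len(m[0])) is replaced by an explicit while-loop that threads the matrix through a loop variable, with the collapse step written as structural recursion over the rows two at a time (and over each row pair two entries at a time), with the same per-level work.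
-- outside the precondition, e.g. on sum_d_product([[1, 2, 3, 4], [1, 2, 3, 4], [1, 2, 3, 4, 5], [1, 2, 3, 4]]): A returns 192, B returns 192
import Mathlib
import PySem

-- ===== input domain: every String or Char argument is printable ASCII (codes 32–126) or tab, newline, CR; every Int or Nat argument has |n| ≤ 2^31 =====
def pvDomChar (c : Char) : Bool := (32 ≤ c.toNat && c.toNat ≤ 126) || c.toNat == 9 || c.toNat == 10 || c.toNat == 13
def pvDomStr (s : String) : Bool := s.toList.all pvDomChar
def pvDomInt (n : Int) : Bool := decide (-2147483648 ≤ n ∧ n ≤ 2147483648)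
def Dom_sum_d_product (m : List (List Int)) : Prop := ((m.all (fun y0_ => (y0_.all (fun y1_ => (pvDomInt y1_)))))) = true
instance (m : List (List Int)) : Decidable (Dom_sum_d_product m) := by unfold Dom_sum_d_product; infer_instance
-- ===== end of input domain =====

-- B replaces A's recursion-with-index-loops by an explicit top-level loop whose collapse step
-- is structural recursion on the rows (two at a time) — objective: alternative decomposition.

-- ===== PORT A =====
-- Python indexing m[i][j] raises IndexError out of range; the total form pyGetD is exact
-- under Pre_, which keeps every index A uses in range.
def pvAtA (m : List (List Int)) (i j : Int) : Int :=
  PySem.List.pyGetD (PySem.List.pyGetD m i ([] : List Int)) j 0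

def pvSolutionA (m : List (List Int)) (i : Int) : List Int :=
  let skip1 := PySem.List.pyRange 0 ((PySem.List.pyGetD m 0 ([] : List Int)).length : Int) 2
  let skip2 := PySem.List.pyRange 1 ((PySem.List.pyGetD m 0 ([] : List Int)).length : Int) 2
  List.zipWith (fun x y => pvAtA m i x * pvAtA m (i+1) y + pvAtA m i y * pvAtA m (i+1) x) skip1 skip2

def pvCollapseA (m : List (List Int)) : List (List Int) :=
  (PySem.List.pyRange 0 (m.length : Int) 2).foldl (fun ans i => ans ++ [pvSolutionA m i]) []

-- A's recursion made total with fuel (on Pre_ inputs the depth is < m.length, so the fuel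
-- is never exhausted there).
def pvGoA : Nat → List (List Int) → Int
  | 0, _ => 0
  | f+1, m =>
    if m.length = 2 then
      pvAtA m 0 0 * pvAtA m 1 1 + pvAtA m 0 1 * pvAtA m 1 0
    else
      pvGoA f (pvCollapseA m)

def sum_d_product (m : List (List Int)) : Int := pvGoA m.length m

-- ===== PORT B =====
def pvAtB (m : List (List Int)) (i j : Int) : Int :=
  PySem.List.pyGetD (PySem.List.pyGetD m i ([] : List Int)) j 0

def pvPairsB : List Int → List Int → List Int
  | a :: b :: r, c :: d :: s => (a * d + b * c) :: pvPairsB r s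
  | _, _ => []

def pvHalveB : List (List Int) → List (List Int)
  | r :: s :: rest => pvPairsB r s :: pvHalveB rest
  | _ => []

-- B's while-loop made total with fuel (on Pre_ inputs the number of iterations is
-- < m.length, so the fuel is never exhausted there).
def pvLoopB : Nat → List (List Int) → List (List Int)
  | 0, m => m
  | f+1, m => if m.length = 2 then m else pvLoopB f (pvHalveB m)

def sum_d_product_alt (m : List (List Int)) : Int :=
  let m' := pvLoopB m.length m
  pvAtB m' 0 0 * pvAtB m' 1 1 + pvAtB m' 0 1 * pvAtB m' 1 0

-- ===== PRECONDITION & SPEC =====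
-- Pre_ = the inputs A evaluates without an exception, in their natural shape: either exactly
-- two rows with at least two entries each (A returns immediately), or a power-of-two number
-- of rows ≥ 4, all rows of one common length at least the number of rows.  A also happens to
-- return on some ragged matrices whose later rows are LONGER than row 0 (it reads only
-- len(m[0]) columns); Pre_ excludes that accidental ragged shape, keeping the function's
-- natural rectangular domain.
def Pre_sum_d_product (m : List (List Int)) : Prop :=
  (m.length = 2 ∧ ∀ r ∈ m, 2 ≤ r.length) ∨
  (4 ≤ m.length ∧ (∃ k : Fin m.length, m.length = 2 ^ ((k : Nat) + 2)) ∧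
    (∀ r ∈ m, r.length = (m.headD []).length) ∧ m.length ≤ (m.headD []).length)

instance (m : List (List Int)) : Decidable (Pre_sum_d_product m) := by
  unfold Pre_sum_d_product; infer_instance

def pvWitness_sum_d_product : List (List Int) := [[1, 2], [3, 4]]

def Spec_sum_d_product (m : List (List Int)) (out : Int) : Prop := out = sum_d_product_alt m
instance (m : List (List Int)) (out : Int) : Decidable (Spec_sum_d_product m out) := by
  unfold Spec_sum_d_product; infer_instance

-- ===== CLAIM (what is proved, stated in full; the proofs are below) =====
def Claim_equal_sum_d_product : Prop :=
  ∀ (m : List (List Int)), Dom_sum_d_product m → Pre_sum_d_product m →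
    Spec_sum_d_product m (sum_d_product m)

-- ===== LEMMAS AND PROOFS =====

theorem pvPairsB_length (r s : List Int) :
    (pvPairsB r s).length = min r.length s.length / 2 := by
  fun_induction pvPairsB r s with
  | case1 a b r c d s ih => simp only [List.length_cons, ih]; omega
  | case2 r s h =>
      rcases r with _|⟨a,_|⟨b,r⟩⟩ <;> rcases s with _|⟨c,_|⟨d,s⟩⟩ <;>
        first
        | (exfalso; exact h _ _ _ _ _ _ rfl rfl)
        | (simp only [pvPairsB, List.length_nil, List.length_cons] <;> omega)

theorem pvPairsB_getD (r s : List Int) (t : Nat) (ht : t < min r.length s.length / 2) :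
    (pvPairsB r s).getD t 0 =
      r.getD (2*t) 0 * s.getD (2*t+1) 0 + r.getD (2*t+1) 0 * s.getD (2*t) 0 := by
  induction t generalizing r s with
  | zero =>
      rcases r with _|⟨a,_|⟨b,r⟩⟩ <;> rcases s with _|⟨c,_|⟨d,s⟩⟩ <;>
        first
        | (exfalso; simp only [List.length_nil, List.length_cons] at ht; omega)
        | simp [pvPairsB]
  | succ t ih =>
      rcases r with _|⟨a,_|⟨b,r⟩⟩ <;> rcases s with _|⟨c,_|⟨d,s⟩⟩ <;>
        first
        | (exfalso; simp only [List.length_nil, List.length_cons] at ht; omega)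
        | (have h2 : 2*(t+1) = 2*t+1+1 := by omega
           simp only [pvPairsB, h2, List.getD_cons_succ]
           apply ih
           simp only [List.length_cons] at ht ⊢
           omega)

theorem pvHalveB_length (m : List (List Int)) :
    (pvHalveB m).length = m.length / 2 := by
  fun_induction pvHalveB m with
  | case1 r s rest ih => simp only [List.length_cons, ih]; omega
  | case2 m h =>
      rcases m with _|⟨r,_|⟨s,m⟩⟩ <;>
        first
        | (exfalso; exact h _ _ _ rfl)
        | (simp only [pvHalveB, List.length_nil, List.length_cons] <;> omega)

theorem pvHalveB_getD (m : List (List Int)) (t : Nat) (ht : t < m.length / 2) :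
    (pvHalveB m).getD t [] = pvPairsB (m.getD (2*t) []) (m.getD (2*t+1) []) := by
  induction t generalizing m with
  | zero =>
      rcases m with _|⟨r,_|⟨s,m⟩⟩ <;>
        first
        | (exfalso; simp only [List.length_nil, List.length_cons] at ht; omega)
        | simp [pvHalveB]
  | succ t ih =>
      rcases m with _|⟨r,_|⟨s,m⟩⟩ <;>
        first
        | (exfalso; simp only [List.length_nil, List.length_cons] at ht; omega)
        | (have h2 : 2*(t+1) = 2*t+1+1 := by omega
           simp only [pvHalveB, h2, List.getD_cons_succ]
           apply ih
           simp only [List.length_cons] at ht ⊢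
           omega)

theorem pvHalveB_rows (m : List (List Int)) (c : Nat)
    (h : ∀ r ∈ m, r.length = c) :
    ∀ r ∈ pvHalveB m, r.length = c / 2 := by
  fun_induction pvHalveB m with
  | case1 r s rest ih =>
      intro x hx
      rcases List.mem_cons.mp hx with hx | hx
      · subst hx
        rw [pvPairsB_length, h r (by simp), h s (by simp)]
        omega
      · exact ih (fun r hr => h r (by simp [hr])) x hx
  | case2 m hm =>
      intro x hx
      rcases m with _|⟨r,_|⟨s,m⟩⟩ <;> first
        | (exfalso; exact hm _ _ _ rfl)
        | simp [pvHalveB] at hx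

theorem pvRangeEven (c : Nat) :
    PySem.List.pyRange 0 (c : Int) 2 = (List.range ((c+1)/2)).map (fun k => ((2*k : Nat) : Int)) := by
  rw [PySem.List.pyRange_of_pos _ _ (by norm_num)]
  have hcount : (if (0:Int) < (c:Int) then (((c:Int) - 0 + 2 - 1) / 2).toNat else 0) = (c+1)/2 := by
    split <;> omega
  rw [hcount]
  apply List.map_congr_left
  intro k _
  push_cast
  ring

theorem pvRangeOdd (c : Nat) :
    PySem.List.pyRange 1 (c : Int) 2 = (List.range (c/2)).map (fun k => ((2*k+1 : Nat) : Int)) := by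
  rw [PySem.List.pyRange_of_pos _ _ (by norm_num)]
  have hcount : (if (1:Int) < (c:Int) then (((c:Int) - 1 + 2 - 1) / 2).toNat else 0) = c/2 := by
    split <;> omega
  rw [hcount]
  apply List.map_congr_left
  intro k _
  push_cast
  ring

theorem pvSolutionA_eq (m : List (List Int)) (c i : Nat)
    (hc0 : (m.getD 0 []).length = c)
    (hi : (m.getD i []).length = c) (hi1 : (m.getD (i+1) []).length = c) :
    pvSolutionA m (i : Int) = pvPairsB (m.getD i []) (m.getD (i+1) []) := by
  apply List.ext_getElem
  · simp only [pvSolutionA, List.length_zipWith, PySem.List.pyGetD_zero, hc0,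
      pvRangeEven, pvRangeOdd, List.length_map, List.length_range, pvPairsB_length, hi, hi1]
    omega
  · intro t h1 h2
    simp only [pvSolutionA, PySem.List.pyGetD_zero, hc0, pvRangeEven, pvRangeOdd] at h1 ⊢
    rw [List.getElem_zipWith]
    simp only [List.getElem_map, List.getElem_range]
    rw [← List.getD_eq_getElem _ 0 h2]
    rw [pvPairsB_getD _ _ t (by rw [pvPairsB_length] at h2; exact h2)]
    simp only [pvAtA]
    have hcast : ((i : Int) + 1) = ((i + 1 : Nat) : Int) := by push_cast; ring
    rw [hcast]
    simp only [PySem.List.pyGetD_natCast]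

theorem pvCollapse_eq (m : List (List Int)) (c : Nat)
    (heven : m.length % 2 = 0) (hrows : ∀ r ∈ m, r.length = c) :
    pvCollapseA m = pvHalveB m := by
  have hmem : ∀ j : Nat, j < m.length → (m.getD j []).length = c := by
    intro j hj
    rw [List.getD_eq_getElem _ _ hj]
    exact hrows _ (List.getElem_mem hj)
  unfold pvCollapseA
  rw [PySem.List.foldl_append_singleton_eq_map, List.nil_append, pvRangeEven, List.map_map]
  apply List.ext_getElem
  · simp only [List.length_map, List.length_range, pvHalveB_length]
    omega
  · intro t h1 h2
    simp only [List.length_map, List.length_range] at h1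
    simp only [List.getElem_map, List.getElem_range, Function.comp_apply]
    rw [List.getElem_eq_getD (fallback := ([] : List Int)), pvHalveB_getD _ t (by omega)]
    have h2t : 2*t < m.length := by omega
    have h2t1 : 2*t+1 < m.length := by omega
    have h0 : (0:Nat) < m.length := by omega
    exact pvSolutionA_eq m c (2*t) (hmem 0 h0) (hmem _ h2t) (hmem _ h2t1)

theorem pvMain (k : Nat) : ∀ (f : Nat) (m : List (List Int)) (c : Nat),
    m.length = 2 ^ (k + 1) → (∀ r ∈ m, r.length = c) → 2 ^ (k + 1) ≤ c → k < f →
    pvGoA f m =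
      (let m' := pvLoopB f m
       pvAtB m' 0 0 * pvAtB m' 1 1 + pvAtB m' 0 1 * pvAtB m' 1 0) := by
  induction k with
  | zero =>
      intro f m c hlen hrows hc hf
      obtain ⟨f', rfl⟩ : ∃ f', f = f' + 1 := ⟨f - 1, by omega⟩
      simp only [pvGoA, pvLoopB, hlen, pvAtA, pvAtB, pow_one, if_pos]
      norm_num
  | succ k ih =>
      intro f m c hlen hrows hc hf
      obtain ⟨f', rfl⟩ : ∃ f', f = f' + 1 := ⟨f - 1, by omega⟩
      have hpow : (2:Nat) ^ (k + 2) = 2 * 2 ^ (k + 1) := by ring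
      have hne : ¬ (m.length = 2) := by
        rw [hlen]
        have := Nat.one_le_two_pow (n := k + 1)
        omega
      simp only [pvGoA, pvLoopB, if_neg hne]
      rw [pvCollapse_eq m c (by omega) hrows]
      exact ih f' (pvHalveB m) (c / 2)
        (by rw [pvHalveB_length, hlen]; omega)
        (pvHalveB_rows m c hrows)
        (by omega)
        (by omega)

theorem pvEq_of_pre (m : List (List Int)) (hpre : Pre_sum_d_product m) :
    sum_d_product m = sum_d_product_alt m := by
  rcases hpre with ⟨h2, _⟩ | ⟨h4, ⟨k, hk⟩, hrows, hc⟩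
  · simp only [sum_d_product, sum_d_product_alt, h2, pvGoA, pvLoopB, pvAtA, pvAtB]
    norm_num
  · have hf : (k : Nat) + 1 < m.length := by
      have h1 : (k : Nat) + 2 < 2 ^ ((k : Nat) + 2) := Nat.lt_two_pow_self
      omega
    exact pvMain ((k : Nat) + 1) m.length m (m.headD []).length hk hrows (hk ▸ hc) hf

-- ===== VERDICT (by name: the statement is the Claim_ definition above) =====
theorem sum_d_product_spec : Claim_equal_sum_d_product := by
  intro m _ hpre
  exact pvEq_of_pre m hpre
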